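-- pv_equiv track=rewrite | github.com/FOLIO-FSE/folio_migration_tools | src/folio_migration_tools/mapping_file_transformation/mapping_file_mapper_base.py | split_obj_by_delim
-- ===== SOURCE A (Python) =====
-- import itertools
-- from typing import List
--
-- def split_obj_by_delim(delimiter: str, folio_obj: dict, delimited_props: List[str]):
--     non_split_props = [(k, v) for k, v in folio_obj.items() if k not in delimited_props]
--     delimited_props = map(lambda x: [x, *folio_obj[x].split(delimiter)], delimited_props)
--     zipped = list(zip(*delimited_props))
--     res = []
--     for (prop_name_idx, prop_name), (value_idx, ra) in itertools.product(
--         enumerate(zipped[0]), enumerate(zipped[1:])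
--     ):
--         if prop_name_idx == 0:
--             res.append({prop_name: ra[prop_name_idx]})
--         else:
--             res[value_idx][prop_name] = ra[prop_name_idx]
--     for r in res:
--         r.update(non_split_props)
--     return res
-- ===== SOURCE B (Python) =====
-- def split_obj_by_delim(delimiter, folio_obj, delimited_props):
--     parts = [folio_obj[k].split(delimiter) for k in delimited_props]
--     non_split = [(k, v) for k, v in folio_obj.items() if k not in delimited_props]
--     res = []
--     for row in zip(*parts):
--         obj = dict(zip(delimited_props, row))
--         obj.update(non_split)
--         res.append(obj)
--     return res
-- ===== Notes on version B (the rewrite author's own statement) =====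
-- stated objective: simpler
-- what changed: Replaces A's header-row transpose + itertools.product with an index-conditional append-or-mutate assembly by a direct per-row construction: zip the split value lists and build each output dict in one go with dict(zip(...)).
import Mathlib
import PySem

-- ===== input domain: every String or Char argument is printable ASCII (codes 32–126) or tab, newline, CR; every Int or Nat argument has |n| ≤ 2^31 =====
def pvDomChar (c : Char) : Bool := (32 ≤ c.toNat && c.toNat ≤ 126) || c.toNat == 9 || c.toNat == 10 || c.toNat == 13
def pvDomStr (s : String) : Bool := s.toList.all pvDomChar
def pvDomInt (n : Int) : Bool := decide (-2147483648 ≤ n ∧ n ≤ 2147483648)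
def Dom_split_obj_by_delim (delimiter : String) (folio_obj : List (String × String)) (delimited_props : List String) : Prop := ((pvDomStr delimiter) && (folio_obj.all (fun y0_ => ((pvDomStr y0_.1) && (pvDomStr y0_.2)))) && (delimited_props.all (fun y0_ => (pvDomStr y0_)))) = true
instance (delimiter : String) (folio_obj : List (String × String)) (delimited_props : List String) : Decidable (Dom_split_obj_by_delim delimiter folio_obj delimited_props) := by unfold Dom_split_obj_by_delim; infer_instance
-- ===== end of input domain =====

-- B replaces A's transpose + itertools.product + index-conditional assembly by a direct
-- per-row construction (zip the split parts, build each output dict in one go): simpler.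
-- Both ports represent the Python dicts as PySem.Dict and return their .items lists.

-- zip(*(l :: rest)) unrolled structurally on the first list (both Pythons call zip(*…))
def pvZipAux {α : Type} [Inhabited α] : List α → List (List α) → List (List α)
  | [], _ => []
  | a :: as, rest =>
    if rest.all (fun l => l.isEmpty = false) then
      (a :: rest.map (fun l => l.headI)) :: pvZipAux as (rest.map (fun l => l.tail))
    else []

-- zip(*ls): truncating transposition, as Python's zip of several lists
def pvZipStar {α : Type} [Inhabited α] : List (List α) → List (List α)
  | [] => []
  | l :: rest => pvZipAux l rest

-- folio_obj[k].split(delimiter); the .getD arms are unreachable inside Pre_ (KeyError /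
-- ValueError on empty separator are excluded there) — both Pythons contain this very expression
def pvSplitProp (delimiter : String) (folio_obj : List (String × String)) (k : String) : List String :=
  (PySem.Str.split? (((PySem.Dict.mk folio_obj).get? k).getD "") delimiter).getD []

-- ===== PORT A =====
def split_obj_by_delim (delimiter : String) (folio_obj : List (String × String)) (delimited_props : List String) : List (List (String × String)) :=
  let non_split_props := folio_obj.filter (fun kv => !(delimited_props.contains kv.1))
  let dl := delimited_props.map (fun x => x :: pvSplitProp delimiter folio_obj x)
  let zipped := pvZipStar dl
  -- zipped[0] raises IndexError when delimited_props = [] — excluded by Pre_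
  let names := (PySem.List.pyGet? zipped 0).getD []
  let rows := PySem.List.slice zipped (some 1) none
  let res := (PySem.List.enumerate names).foldl (fun res pp =>
      (PySem.List.enumerate rows).foldl (fun res vr =>
        if pp.1 = 0 then
          res ++ [PySem.Dict.insert PySem.Dict.empty pp.2 ((PySem.List.pyGet? vr.2 pp.1).getD "")]
        else
          res.modify vr.1.toNat (fun d => d.insert pp.2 ((PySem.List.pyGet? vr.2 pp.1).getD ""))
      ) res) ([] : List (PySem.Dict String String))
  (res.map (fun r => r.update non_split_props)).map PySem.Dict.items

-- ===== PORT B =====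
def split_obj_by_delim_alt (delimiter : String) (folio_obj : List (String × String)) (delimited_props : List String) : List (List (String × String)) :=
  let parts := delimited_props.map (pvSplitProp delimiter folio_obj)
  let non_split := folio_obj.filter (fun kv => !(delimited_props.contains kv.1))
  (pvZipStar parts).map (fun row =>
    ((PySem.Dict.ofList (delimited_props.zip row)).update non_split).items)

-- ===== PRECONDITION & SPEC =====
-- Pre_ excludes exactly the inputs where Python A raises: delimited_props = [] (IndexError on
-- zipped[0]), an empty delimiter (ValueError from str.split('')), and a delimited prop missing
-- from folio_obj (KeyError).
def Pre_split_obj_by_delim (delimiter : String) (folio_obj : List (String × String)) (delimited_props : List String) : Prop :=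
  delimited_props ≠ [] ∧ delimiter ≠ "" ∧ ∀ p ∈ delimited_props, p ∈ folio_obj.map Prod.fst
instance (delimiter : String) (folio_obj : List (String × String)) (delimited_props : List String) : Decidable (Pre_split_obj_by_delim delimiter folio_obj delimited_props) := by unfold Pre_split_obj_by_delim; infer_instance

def pvWitness_split_obj_by_delim : String × (List (String × String)) × List String :=
  (",", [("a", "1,2"), ("b", "x,y"), ("c", "q")], ["a", "b"])

def Spec_split_obj_by_delim (delimiter : String) (folio_obj : List (String × String)) (delimited_props : List String) (out : List (List (String × String))) : Prop := out = split_obj_by_delim_alt delimiter folio_obj delimited_props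
instance (delimiter : String) (folio_obj : List (String × String)) (delimited_props : List String) (out : List (List (String × String))) : Decidable (Spec_split_obj_by_delim delimiter folio_obj delimited_props out) := by unfold Spec_split_obj_by_delim; infer_instance

-- ===== CLAIM (what is proved, stated in full; the proofs are below) =====
def Claim_equal_split_obj_by_delim : Prop := ∀ (delimiter : String) (folio_obj : List (String × String)) (delimited_props : List String), Dom_split_obj_by_delim delimiter folio_obj delimited_props → Pre_split_obj_by_delim delimiter folio_obj delimited_props → Spec_split_obj_by_delim delimiter folio_obj delimited_props (split_obj_by_delim delimiter folio_obj delimited_props)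


-- ===== LEMMAS AND PROOFS =====

-- rows of pvZipAux have one entry per list
theorem pvZipAux_row_length {α : Type} [Inhabited α] :
    ∀ (l : List α) (rest : List (List α)), ∀ r ∈ pvZipAux l rest, r.length = rest.length + 1 := by
  intro l
  induction l with
  | nil => intro rest r hr; simp [pvZipAux] at hr
  | cons a as ih =>
    intro rest r hr
    simp only [pvZipAux] at hr
    split at hr
    · rcases List.mem_cons.mp hr with rfl | hr
      · simp
      · simpa using ih (rest.map (fun l => l.tail)) r hr
    · simp at hr

-- every row of zip(*ls) has one entry per list
theorem pvZipStar_row_length {α : Type} [Inhabited α] (ls : List (List α)) :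
    ∀ r ∈ pvZipStar ls, r.length = ls.length := by
  cases ls with
  | nil => intro r hr; simp [pvZipStar] at hr
  | cons l rest =>
    intro r hr
    simpa using pvZipAux_row_length l rest r hr

-- zip(*[k :: f k for k]) peels off the row of prop names
theorem pvZipStar_cons_heads (props : List String) (f : String → List String) (h : props ≠ []) :
    pvZipStar (props.map (fun k => k :: f k)) = props :: pvZipStar (props.map f) := by
  cases props with
  | nil => exact absurd rfl h
  | cons p ps =>
    simp only [List.map_cons, pvZipStar, pvZipAux]
    rw [if_pos (by simp)]
    simp [List.map_map, Function.comp_def]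

-- List.modify at the length of the left part of an append
theorem pvModifyAppend {α : Type} (f : α → α) :
    ∀ (done : List α) (a : α) (l : List α),
    (done ++ a :: l).modify done.length f = done ++ f a :: l := by
  intro done
  induction done with
  | nil => intro a l; simp [List.modify]
  | cons d ds ih => intro a l; simpa [List.modify] using ih a l

-- the inner fold of A for a nonzero prop index: pointwise modification of an aligned list
theorem pvInnerModify (step : List String → PySem.Dict String String → PySem.Dict String String) :
    ∀ (rows : List (List String)) (done : List (PySem.Dict String String))
      (g : List String → PySem.Dict String String),
    (PySem.List.enumerate rows (done.length : Int)).foldl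
        (fun res vr => res.modify vr.1.toNat (step vr.2)) (done ++ rows.map g)
      = done ++ rows.map (fun ra => step ra (g ra)) := by
  intro rows
  induction rows with
  | nil => intro done g; simp [PySem.List.enumerate_nil]
  | cons ra rest ih =>
    intro done g
    rw [PySem.List.enumerate_cons, List.foldl_cons, List.map_cons]
    have h1 : ((done.length : Int)).toNat = done.length := by simp
    rw [h1, pvModifyAppend]
    have h2 : done ++ step ra (g ra) :: rest.map g
        = (done ++ [step ra (g ra)]) ++ rest.map g := by simp
    have h3 : (done.length : Int) + 1 = (((done ++ [step ra (g ra)]).length : Nat) : Int) := by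
      simp
    rw [h2, h3, ih (done ++ [step ra (g ra)]) g]
    simp

-- the outer fold of A over prop indices ≥ 1 maps each row dict forward
theorem pvOuterFold (R : List (List String)) :
    ∀ (ps : List String) (s : Int), 1 ≤ s →
    ∀ (g : List String → PySem.Dict String String),
    (PySem.List.enumerate ps s).foldl (fun res pp =>
        (PySem.List.enumerate R).foldl (fun res vr =>
          if pp.1 = 0 then
            res ++ [PySem.Dict.insert PySem.Dict.empty pp.2 ((PySem.List.pyGet? vr.2 pp.1).getD "")]
          else
            res.modify vr.1.toNat (fun d => d.insert pp.2 ((PySem.List.pyGet? vr.2 pp.1).getD ""))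
        ) res) (R.map g)
      = R.map (fun ra => (PySem.List.enumerate ps s).foldl
          (fun d pp => d.insert pp.2 ((PySem.List.pyGet? ra pp.1).getD "")) (g ra)) := by
  intro ps
  induction ps with
  | nil => intro s hs g; simp [PySem.List.enumerate_nil]
  | cons p ps' ih =>
    intro s hs g
    rw [PySem.List.enumerate_cons]
    simp only [List.foldl_cons]
    have hstep : (fun (res : List (PySem.Dict String String)) (vr : Int × List String) =>
        if (s, p).1 = 0 then
          res ++ [PySem.Dict.insert PySem.Dict.empty (s, p).2 ((PySem.List.pyGet? vr.2 (s, p).1).getD "")]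
        else
          res.modify vr.1.toNat (fun d => d.insert (s, p).2 ((PySem.List.pyGet? vr.2 (s, p).1).getD "")))
        = fun res vr => res.modify vr.1.toNat
            (fun d => d.insert p ((PySem.List.pyGet? vr.2 s).getD "")) := by
      funext res vr
      rw [if_neg (by simp only; omega)]
    rw [hstep]
    have hinner := pvInnerModify (fun ra d => d.insert p ((PySem.List.pyGet? ra s).getD "")) R [] g
    simp only [List.length_nil, Nat.cast_zero, List.nil_append] at hinner
    rw [hinner, ih (s + 1) (by omega) (fun ra => (g ra).insert p ((PySem.List.pyGet? ra s).getD ""))]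

-- indexed insertion over enumerate equals the fold over zip
theorem pvZipFold :
    ∀ (ps : List String) (ra : List String) (s : Nat) (d : PySem.Dict String String),
    s + ps.length ≤ ra.length →
    (PySem.List.enumerate ps (s : Int)).foldl
        (fun d pp => d.insert pp.2 ((PySem.List.pyGet? ra pp.1).getD "")) d
      = (ps.zip (ra.drop s)).foldl (fun d q => d.insert q.1 q.2) d := by
  intro ps ra
  induction ps with
  | nil => intro s d h; simp [PySem.List.enumerate_nil]
  | cons p ps' ih =>
    intro s d h
    have hs : s < ra.length := by simp at h; omega
    have hget : PySem.List.pyGet? ra (s : Int) = some ra[s] := by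
      rw [PySem.List.pyGet?_natCast]; exact List.getElem?_eq_getElem hs
    rw [PySem.List.enumerate_cons, List.foldl_cons,
        List.drop_eq_getElem_cons hs, List.zip_cons_cons, List.foldl_cons]
    simp only [hget, Option.getD_some]
    have hcast : (s : Int) + 1 = (((s + 1 : Nat)) : Int) := by push_cast; ring
    rw [hcast, ih (s + 1) (d.insert p ra[s]) (by simp at h ⊢; omega)]

-- ===== VERDICT (by name: the statement is the Claim_ definition above) =====
theorem split_obj_by_delim_spec : Claim_equal_split_obj_by_delim := by
  intro delimiter folio_obj props _hdom hpre
  obtain ⟨hne, -, -⟩ := hpre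
  unfold Spec_split_obj_by_delim split_obj_by_delim split_obj_by_delim_alt
  cases props with
  | nil => exact absurd rfl hne
  | cons p ps =>
    simp only [pvZipStar_cons_heads (p :: ps) (pvSplitProp delimiter folio_obj) (by simp),
      PySem.List.pyGet?_zero_cons, Option.getD_some, PySem.List.slice_from_one, List.tail_cons]
    rw [List.map_map]
    rw [PySem.List.enumerate_cons p ps 0, List.foldl_cons]
    have hstep0 : (fun (res : List (PySem.Dict String String)) (vr : Int × List String) =>
        if ((0 : Int), p).1 = 0 then
          res ++ [PySem.Dict.empty.insert ((0 : Int), p).2 ((PySem.List.pyGet? vr.2 ((0 : Int), p).1).getD "")]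
        else
          res.modify vr.1.toNat (fun d => d.insert ((0 : Int), p).2 ((PySem.List.pyGet? vr.2 ((0 : Int), p).1).getD "")))
        = fun res vr => res ++ [PySem.Dict.empty.insert p ((PySem.List.pyGet? vr.2 0).getD "")] := by
      funext res vr; rw [if_pos rfl]
    rw [hstep0, PySem.List.foldl_append_singleton_eq_map
      (fun vr : Int × List String => PySem.Dict.empty.insert p ((PySem.List.pyGet? vr.2 0).getD "")), List.nil_append]
    have hmapsnd : (PySem.List.enumerate (pvZipStar (List.map (pvSplitProp delimiter folio_obj) (p :: ps)))).map
          (fun vr : Int × List String => PySem.Dict.empty.insert p ((PySem.List.pyGet? vr.2 0).getD ""))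
        = (pvZipStar (List.map (pvSplitProp delimiter folio_obj) (p :: ps))).map
          (fun ra => PySem.Dict.empty.insert p ((PySem.List.pyGet? ra 0).getD "")) := by
      conv_rhs => rw [← PySem.List.map_snd_enumerate
        (pvZipStar (List.map (pvSplitProp delimiter folio_obj) (p :: ps))) 0, List.map_map]
      rfl
    rw [hmapsnd]
    rw [show (0 : Int) + 1 = 1 by norm_num]
    rw [pvOuterFold (pvZipStar (List.map (pvSplitProp delimiter folio_obj) (p :: ps))) ps 1 (by norm_num)
      (fun ra => PySem.Dict.empty.insert p ((PySem.List.pyGet? ra 0).getD ""))]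
    rw [List.map_map]
    apply List.map_congr_left
    intro ra hra
    have hlen : ra.length = ps.length + 1 := by
      have := pvZipStar_row_length (List.map (pvSplitProp delimiter folio_obj) (p :: ps)) ra hra
      simpa using this
    simp only [Function.comp_apply]
    congr 2
    -- A's per-row dict equals dict(zip(delimited_props, row))
    have hz := pvZipFold (p :: ps) ra 0 PySem.Dict.empty (by simp [hlen])
    rw [List.drop_zero] at hz
    rw [PySem.List.enumerate_cons p ps ((0 : Nat) : Int), List.foldl_cons] at hz
    simp only [Nat.cast_zero] at hz
    rw [show (0 : Int) + 1 = 1 by norm_num] at hz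
    rw [hz]; rfl
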